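-- pv_equiv track=rewrite | github.com/samcho0608/Algorithms_Data_Structures | programmers/high scoring kit/heap/더 맵게.py | solution
-- ===== SOURCE A (Python) =====
-- import heapq
--
-- def solution(scoville, K):
--     count = 0
--     heapq.heapify(scoville)
--     while True:
--         minVal = heapq.heappop(scoville)
--         if minVal >= K :
--             return count
--
--         if len(scoville) == 0 :
--             return -1
--
--         newVal = calculateMixedScoville(minVal, heapq.heappop(scoville))
--         heapq.heappush(scoville, newVal)
--         count += 1
--
-- def calculateMixedScoville(leastSpicy, secondLeastSpicy) :
--     return 2 * secondLeastSpicy + leastSpicy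
-- ===== SOURCE B (Python) =====
-- def solution(scoville, K):
--     lst = sorted(scoville)
--     count = 0
--     while lst[0] < K:
--         if len(lst) == 1:
--             return -1
--         first, second = lst[0], lst[1]
--         lst = lst[2:]
--         v = 2 * second + first
--         i = 0
--         while i < len(lst) and lst[i] < v:
--             i += 1
--         lst.insert(i, v)
--         count += 1
--     return count
-- ===== Notes on version B (the rewrite author's own statement) =====
-- stated objective: alternative
-- what changed: Replaces the binary heap (heapify/heappop/heappush) with a fully sorted list: sort once, take the two front elements each round, and re-insert the mixed value at its ordered position by a scan-and-insert.
import Mathlib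
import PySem

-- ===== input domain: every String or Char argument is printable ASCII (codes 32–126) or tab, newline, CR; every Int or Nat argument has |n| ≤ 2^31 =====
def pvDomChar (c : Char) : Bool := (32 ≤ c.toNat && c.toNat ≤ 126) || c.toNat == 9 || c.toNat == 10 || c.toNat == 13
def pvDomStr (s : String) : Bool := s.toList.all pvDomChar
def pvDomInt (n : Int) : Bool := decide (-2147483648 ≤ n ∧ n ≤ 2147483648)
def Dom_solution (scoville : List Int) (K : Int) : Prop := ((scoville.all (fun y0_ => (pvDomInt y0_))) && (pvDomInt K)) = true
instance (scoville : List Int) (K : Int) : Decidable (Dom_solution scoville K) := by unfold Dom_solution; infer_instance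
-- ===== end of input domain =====

-- B replaces A's binary heap (a verified port of CPython's heapq) with a sorted list: sort once,
-- take the two front elements, re-insert the mix at its ordered position (objective: alternative).
-- A mutates its scoville argument in place (heapify); the equivalence proved here is about the return value only.

-- ===== PORT A =====
def gd (l : List Int) (i : Nat) : Int := l.getD i 0

-- CPython heapq._siftdown's while loop (newitem already read)
def sdLoop (l : List Int) (s pos : Nat) (x : Int) : List Int :=
  if _h : s < pos then
    let parent := gd l ((pos - 1) / 2)
    if x < parent then sdLoop (l.set pos parent) s ((pos - 1) / 2) x
    else l.set pos x
  else l.set pos x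
termination_by pos
decreasing_by omega

def suChild (l : List Int) (pos : Nat) : Nat :=
  if 2 * pos + 2 < l.length ∧ ¬ (gd l (2 * pos + 1) < gd l (2 * pos + 2)) then 2 * pos + 2
  else 2 * pos + 1

-- CPython heapq._siftup's while loop followed by its final _siftdown
def suLoop (l : List Int) (s pos : Nat) (x : Int) : List Int :=
  if _h : 2 * pos + 1 < l.length then
    suLoop (l.set pos (gd l (suChild l pos))) s (suChild l pos) x
  else sdLoop (l.set pos x) s pos x
termination_by l.length - pos
decreasing_by
  simp only [List.length_set]
  have : pos < suChild l pos ∧ suChild l pos < l.length := by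
    unfold suChild; split <;> omega
  omega

def siftup (l : List Int) (pos : Nat) : List Int := suLoop l pos pos (gd l pos)

def pyHeapify (x : List Int) : List Int :=
  (List.range (x.length / 2)).reverse.foldl (fun l i => siftup l i) x

def pyHeappush (h : List Int) (v : Int) : List Int := sdLoop (h ++ [v]) 0 h.length v

def pyHeappop (h : List Int) : Int × List Int :=
  match h.getLast? with
  | none => (0, [])            -- Python raises IndexError here; excluded by Pre_solution
  | some lastelt =>
    let rest := h.dropLast
    if rest.isEmpty then (lastelt, [])
    else (gd rest 0, siftup (rest.set 0 lastelt) 0)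

def calculateMixedScoville (leastSpicy secondLeastSpicy : Int) : Int :=
  2 * secondLeastSpicy + leastSpicy

def loopA : Nat → List Int → Int → Int → Int
  | 0, _, _, _ => 0            -- unreachable: fuel = initial length suffices
  | fuel + 1, heap, K, count =>
    let p := pyHeappop heap
    if K ≤ p.1 then count
    else if p.2.length = 0 then -1
    else
      let q := pyHeappop p.2
      loopA fuel (pyHeappush q.2 (calculateMixedScoville p.1 q.1)) K (count + 1)

def solution (scoville : List Int) (K : Int) : Int :=
  loopA scoville.length (pyHeapify scoville) K 0

-- ===== PORT B =====
def bIns : List Int → Int → List Int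
  | [], v => [v]
  | x :: xs, v => if x < v then x :: bIns xs v else v :: x :: xs

def sortL (xs : List Int) : List Int := PySem.List.sorted xs (fun x => x) false

def loopB : Nat → List Int → Int → Int → Int
  | 0, _, _, _ => 0
  | fuel + 1, lst, K, count =>
    match lst with
    | [] => 0                  -- Python raises IndexError (lst[0]); excluded by Pre_solution
    | a :: rest =>
      if a < K then
        match rest with
        | [] => -1
        | b :: rest2 => loopB fuel (bIns rest2 (2 * b + a)) K (count + 1)
      else count

def solution_alt (scoville : List Int) (K : Int) : Int :=
  loopB scoville.length (sortL scoville) K 0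


-- ===== PRECONDITION & SPEC =====
-- Pre_solution excludes exactly the empty list, on which A raises IndexError (heappop from an empty heap);
-- B raises IndexError there as well (lst[0] on an empty list).
def Pre_solution (scoville : List Int) (K : Int) : Prop := scoville ≠ []
instance (scoville : List Int) (K : Int) : Decidable (Pre_solution scoville K) := by unfold Pre_solution; infer_instance
def pvWitness_solution : List Int × Int := ([1, 12, 3], 7)
def Spec_solution (scoville : List Int) (K : Int) (out : Int) : Prop := out = solution_alt scoville K
instance (scoville : List Int) (K : Int) (out : Int) : Decidable (Spec_solution scoville K out) := by unfold Spec_solution; infer_instance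

-- ===== CLAIM (what is proved, stated in full; the proofs are below) =====
def Claim_equal_solution : Prop := ∀ (scoville : List Int) (K : Int), Dom_solution scoville K → Pre_solution scoville K → Spec_solution scoville K (solution scoville K)

-- ===== LEMMAS AND PROOFS =====
def anc (s j : Nat) : Bool :=
  if j < s then false
  else if j = s then true
  else anc s ((j - 1) / 2)
termination_by j
decreasing_by omega

theorem anc_self (s : Nat) : anc s s = true := by unfold anc; simp

theorem anc_zero (j : Nat) : anc 0 j = true := by
  induction j using Nat.strong_induction_on with
  | _ j ih =>
    unfold anc
    rcases Nat.eq_zero_or_pos j with h | h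
    · simp [h]
    · simp only [Nat.not_lt_zero, if_false]
      split
      · rfl
      · exact ih _ (by omega)

theorem anc_ge {s j : Nat} (h : anc s j = true) : s ≤ j := by
  unfold anc at h
  by_cases h1 : j < s
  · simp [h1] at h
  · omega

theorem anc_step {s j : Nat} (h : s < j) : anc s j = anc s ((j - 1) / 2) := by
  conv_lhs => rw [anc]
  rw [if_neg (by omega), if_neg (by omega)]

theorem gd_set_self {l : List Int} {i : Nat} (h : i < l.length) (a : Int) :
    gd (l.set i a) i = a := by
  simp [gd, List.getD, h]

theorem gd_set_ne (l : List Int) {i j : Nat} (h : i ≠ j) (a : Int) :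
    gd (l.set i a) j = gd l j := by
  simp [gd, List.getD, List.getElem?_set_ne h]

theorem perm_set {l : List Int} {i : Nat} (h : i < l.length) (x : Int) :
    (gd l i :: l.set i x).Perm (x :: l) := by
  have hset : l.set i x = l.take i ++ x :: l.drop (i + 1) := by
    rw [List.set_eq_take_append_cons_drop, if_pos h]
  have hl : l = l.take i ++ l[i] :: l.drop (i + 1) := by
    conv_lhs => rw [← List.take_append_drop i l, ← List.getElem_cons_drop h]
  have hgd : gd l i = l[i] := by simp [gd, List.getD, List.getElem?_eq_getElem h]
  rw [hset, hgd]
  refine List.Perm.trans (List.Perm.cons _ List.perm_middle) ?_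
  refine List.Perm.trans (List.Perm.swap _ _ _) ?_
  refine List.Perm.trans (List.Perm.cons _ List.perm_middle.symm) ?_
  rw [← hl]

theorem set_swap_perm {l : List Int} {i j : Nat} (hi : i < l.length) (hj : j < l.length)
    (hne : i ≠ j) (x : Int) : ((l.set i (gd l j)).set j x).Perm (l.set i x) := by
  have h1 : (gd (l.set i (gd l j)) j :: (l.set i (gd l j)).set j x).Perm (x :: l.set i (gd l j)) :=
    perm_set (by simpa using hj) x
  rw [gd_set_ne l hne] at h1
  have h2 : (gd l i :: l.set i (gd l j)).Perm (gd l j :: l) := perm_set hi (gd l j)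
  have h3 : (gd l i :: l.set i x).Perm (x :: l) := perm_set hi x
  -- cancel over multisets
  rw [← Multiset.coe_eq_coe] at h1 h2 h3 ⊢
  simp only [← Multiset.cons_coe] at h1 h2 h3 ⊢
  have key : gd l i ::ₘ gd l j ::ₘ (((l.set i (gd l j)).set j x : List Int) : Multiset Int)
      = gd l i ::ₘ gd l j ::ₘ ((l.set i x : List Int) : Multiset Int) := by
    calc gd l i ::ₘ gd l j ::ₘ (((l.set i (gd l j)).set j x : List Int) : Multiset Int)
        = gd l i ::ₘ (x ::ₘ ((l.set i (gd l j) : List Int) : Multiset Int)) := by rw [h1]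
      _ = x ::ₘ gd l i ::ₘ ((l.set i (gd l j) : List Int) : Multiset Int) := Multiset.cons_swap _ _ _
      _ = x ::ₘ gd l j ::ₘ (l : Multiset Int) := by rw [h2]
      _ = gd l j ::ₘ x ::ₘ (l : Multiset Int) := Multiset.cons_swap _ _ _
      _ = gd l j ::ₘ gd l i ::ₘ ((l.set i x : List Int) : Multiset Int) := by rw [← h3]
      _ = gd l i ::ₘ gd l j ::ₘ ((l.set i x : List Int) : Multiset Int) := Multiset.cons_swap _ _ _
  exact (Multiset.cons_inj_right _).mp ((Multiset.cons_inj_right _).mp key)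

theorem anc_lt_false {s j : Nat} (h : j < s) : anc s j = false := by
  unfold anc; simp [h]

theorem sdLoop_step {l : List Int} {s pos : Nat} {x : Int} (hlt : s < pos)
    (hx : x < gd l ((pos - 1) / 2)) :
    sdLoop l s pos x = sdLoop (l.set pos (gd l ((pos - 1) / 2))) s ((pos - 1) / 2) x := by
  rw [sdLoop]; simp [hlt, hx]

theorem sdLoop_stop1 {l : List Int} {s pos : Nat} {x : Int} (hlt : s < pos)
    (hx : ¬ x < gd l ((pos - 1) / 2)) : sdLoop l s pos x = l.set pos x := by
  rw [sdLoop]; simp [hlt, hx]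

theorem sdLoop_stop2 {l : List Int} {s pos : Nat} {x : Int} (hlt : ¬ s < pos) :
    sdLoop l s pos x = l.set pos x := by
  rw [sdLoop]; simp [hlt]

theorem sd_spec (s : Nat) (x : Int) (l : List Int) (pos : Nat) :
    pos < l.length → anc s pos = true →
    (∀ j, 0 < j → j < l.length → anc s ((j - 1) / 2) = true → j ≠ pos →
      gd l ((j - 1) / 2) ≤ gd l j) →
    (∀ c, (c = 2 * pos + 1 ∨ c = 2 * pos + 2) → c < l.length → x ≤ gd l c) →
    (∀ c, (c = 2 * pos + 1 ∨ c = 2 * pos + 2) → c < l.length → s < pos →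
      gd l ((pos - 1) / 2) ≤ gd l c) →
    (sdLoop l s pos x).Perm (l.set pos x)
    ∧ (sdLoop l s pos x).length = l.length
    ∧ (∀ j, anc s j = false → gd (sdLoop l s pos x) j = gd l j)
    ∧ (∀ j, 0 < j → j < l.length → anc s ((j - 1) / 2) = true →
        gd (sdLoop l s pos x) ((j - 1) / 2) ≤ gd (sdLoop l s pos x) j) := by
  induction l, pos using sdLoop.induct s x with
  | case1 l pos hlt parent hx ih =>
    intro hpos hanc hEdges hkids hpar
    have hpeq : parent = gd l ((pos - 1) / 2) := rfl
    clear_value parent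
    subst hpeq
    have hppos : 0 < pos := by omega
    have hpplt : (pos - 1) / 2 < pos := by omega
    have hppl : (pos - 1) / 2 < l.length := by omega
    have hancpp : anc s ((pos - 1) / 2) = true := by rw [← anc_step hlt]; exact hanc
    have hlen' : (l.set pos (gd l ((pos - 1) / 2))).length = l.length := by simp
    have gd_pos : gd (l.set pos (gd l ((pos - 1) / 2))) pos = gd l ((pos - 1) / 2) :=
      gd_set_self hpos _
    have gd_ne : ∀ j, j ≠ pos → gd (l.set pos (gd l ((pos - 1) / 2))) j = gd l j := by
      intro j hj; exact gd_set_ne l (fun h => hj h.symm) _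
    have H := ih (by omega) hancpp
      (by -- edges except into (pos-1)/2
        intro j hj0 hjl hancp hjpp
        rw [hlen'] at hjl
        by_cases hje : j = pos
        · subst hje
          rw [gd_pos, gd_ne _ (by omega)]
        · rw [gd_ne j hje]
          by_cases hpe : (j - 1) / 2 = pos
          · have hchild : j = 2 * pos + 1 ∨ j = 2 * pos + 2 := by omega
            rw [hpe, gd_pos]
            exact hpar j hchild hjl hlt
          · rw [gd_ne _ hpe]
            exact hEdges j hj0 hjl hancp hje)
      (by -- x ≤ children of (pos-1)/2
        intro c hc hcl
        rw [hlen'] at hcl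
        have hc0 : 0 < c := by omega
        by_cases hce : c = pos
        · subst hce; rw [gd_pos]; exact le_of_lt hx
        · rw [gd_ne c hce]
          have hcp : (c - 1) / 2 = (pos - 1) / 2 := by omega
          have h2 : gd l ((pos - 1) / 2) ≤ gd l c := by
            have := hEdges c hc0 hcl (by rw [hcp]; exact hancpp) hce
            rwa [hcp] at this
          exact le_trans (le_of_lt hx) h2)
      (by -- grandparent ≤ children of (pos-1)/2
        intro c hc hcl hspp
        rw [hlen'] at hcl
        have hpp0 : 0 < (pos - 1) / 2 := by omega
        have hgp : ((pos - 1) / 2 - 1) / 2 ≠ pos := by omega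
        rw [gd_ne _ hgp]
        have hancgp : anc s (((pos - 1) / 2 - 1) / 2) = true := by
          rw [← anc_step hspp]; exact hancpp
        have hEpp : gd l (((pos - 1) / 2 - 1) / 2) ≤ gd l ((pos - 1) / 2) :=
          hEdges _ hpp0 hppl hancgp (by omega)
        by_cases hce : c = pos
        · subst hce; rw [gd_pos]; exact hEpp
        · rw [gd_ne c hce]
          have hc0 : 0 < c := by omega
          have hcp : (c - 1) / 2 = (pos - 1) / 2 := by omega
          have h2 : gd l ((pos - 1) / 2) ≤ gd l c := by
            have := hEdges c hc0 hcl (by rw [hcp]; exact hancpp) hce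
            rwa [hcp] at this
          exact le_trans hEpp h2)
    obtain ⟨P', L', U', E'⟩ := H
    rw [sdLoop_step hlt hx]
    refine ⟨P'.trans (set_swap_perm hpos hppl (by omega) x), by rw [L', hlen'], ?_, ?_⟩
    · intro j hj
      have hjpos : j ≠ pos := by intro h; rw [h, hanc] at hj; cases hj
      rw [U' j hj, gd_ne j hjpos]
    · intro j hj0 hjl hancp
      exact E' j hj0 (by rw [hlen']; exact hjl) hancp
  | case2 l pos hlt parent hx =>
    intro hpos hanc hEdges hkids hpar
    have hpeq : parent = gd l ((pos - 1) / 2) := rfl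
    clear_value parent
    subst hpeq
    rw [sdLoop_stop1 hlt hx]
    refine ⟨List.Perm.refl _, by simp, ?_, ?_⟩
    · intro j hj
      have hjpos : j ≠ pos := by intro h; rw [h, hanc] at hj; cases hj
      exact gd_set_ne l (fun h => hjpos h.symm) x
    · intro j hj0 hjl hancp
      by_cases hje : j = pos
      · subst hje
        have hne : (j - 1) / 2 ≠ j := by omega
        rw [gd_set_self hjl x, gd_set_ne l (fun h => hne h.symm) x]
        omega
      · rw [gd_set_ne l (fun h => hje h.symm) x]
        by_cases hpe : (j - 1) / 2 = pos
        · rw [hpe, gd_set_self hpos x]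
          exact hkids j (by omega) hjl
        · rw [gd_set_ne l (fun h => hpe h.symm) x]
          exact hEdges j hj0 hjl hancp hje
  | case3 l pos hlt =>
    intro hpos hanc hEdges hkids hpar
    have hps : pos = s := le_antisymm (by omega) (anc_ge hanc)
    rw [sdLoop_stop2 hlt]
    refine ⟨List.Perm.refl _, by simp, ?_, ?_⟩
    · intro j hj
      have hjpos : j ≠ pos := by intro h; rw [h, hanc] at hj; cases hj
      exact gd_set_ne l (fun h => hjpos h.symm) x
    · intro j hj0 hjl hancp
      have hje : j ≠ pos := by
        intro h; subst h
        have hlt2 : (j - 1) / 2 < s := by omega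
        rw [anc_lt_false hlt2] at hancp; cases hancp
      rw [gd_set_ne l (fun h => hje h.symm) x]
      by_cases hpe : (j - 1) / 2 = pos
      · rw [hpe, gd_set_self hpos x]
        exact hkids j (by omega) hjl
      · rw [gd_set_ne l (fun h => hpe h.symm) x]
        exact hEdges j hj0 hjl hancp hje

theorem suChild_bounds {l : List Int} {pos : Nat} (h : 2 * pos + 1 < l.length) :
    pos < suChild l pos ∧ suChild l pos < l.length
    ∧ (suChild l pos = 2 * pos + 1 ∨ suChild l pos = 2 * pos + 2) := by
  unfold suChild; split <;> omega

theorem suChild_min {l : List Int} {pos : Nat} (_h : 2 * pos + 1 < l.length)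
    (c : Nat) (hc : c = 2 * pos + 1 ∨ c = 2 * pos + 2) (hcl : c < l.length) :
    gd l (suChild l pos) ≤ gd l c := by
  unfold suChild
  split
  · rename_i hcond
    rcases hc with hc | hc <;> subst hc
    · omega
    · exact le_refl _
  · rename_i hcond
    rcases hc with hc | hc <;> subst hc
    · exact le_refl _
    · have : gd l (2 * pos + 1) < gd l (2 * pos + 2) := by
        by_contra hno
        exact hcond ⟨hcl, hno⟩
      omega

theorem suLoop_step {l : List Int} {s pos : Nat} {x : Int} (h : 2 * pos + 1 < l.length) :
    suLoop l s pos x = suLoop (l.set pos (gd l (suChild l pos))) s (suChild l pos) x := by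
  rw [suLoop]; simp [h]

theorem suLoop_base {l : List Int} {s pos : Nat} {x : Int} (h : ¬ 2 * pos + 1 < l.length) :
    suLoop l s pos x = sdLoop (l.set pos x) s pos x := by
  rw [suLoop]; simp [h]

theorem su_spec (s : Nat) (x : Int) (l : List Int) (pos : Nat) :
    pos < l.length → anc s pos = true →
    (∀ j, 0 < j → j < l.length → anc s ((j - 1) / 2) = true → (j - 1) / 2 ≠ pos →
      gd l ((j - 1) / 2) ≤ gd l j) →
    (∀ c, (c = 2 * pos + 1 ∨ c = 2 * pos + 2) → c < l.length → s < pos →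
      gd l ((pos - 1) / 2) ≤ gd l c) →
    (suLoop l s pos x).Perm (l.set pos x)
    ∧ (suLoop l s pos x).length = l.length
    ∧ (∀ j, anc s j = false → gd (suLoop l s pos x) j = gd l j)
    ∧ (∀ j, 0 < j → j < l.length → anc s ((j - 1) / 2) = true →
        gd (suLoop l s pos x) ((j - 1) / 2) ≤ gd (suLoop l s pos x) j) := by
  induction l, pos using suLoop.induct with
  | case1 l pos hlt ih =>
    intro hpos hanc hE1 hE2
    obtain ⟨hcgt, hcl, hcmem⟩ := suChild_bounds hlt
    have hcp : (suChild l pos - 1) / 2 = pos := by omega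
    have hlen' : (l.set pos (gd l (suChild l pos))).length = l.length := by simp
    have gd_pos : gd (l.set pos (gd l (suChild l pos))) pos = gd l (suChild l pos) :=
      gd_set_self hpos _
    have gd_ne : ∀ j, j ≠ pos → gd (l.set pos (gd l (suChild l pos))) j = gd l j := by
      intro j hj; exact gd_set_ne l (fun h => hj h.symm) _
    have hancc : anc s (suChild l pos) = true := by
      rw [anc_step (by have := anc_ge hanc; omega), hcp]; exact hanc
    have H := ih (by rw [hlen']; exact hcl) hancc
      (by
        intro j hj0 hjl hancp hjc
        rw [hlen'] at hjl
        by_cases hpe : (j - 1) / 2 = pos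
        · have hchild : j = 2 * pos + 1 ∨ j = 2 * pos + 2 := by omega
          rw [hpe, gd_pos]
          by_cases hje : j = suChild l pos
          · subst hje; rw [gd_ne _ (by omega)]
          · rw [gd_ne j (by omega)]
            exact suChild_min hlt j hchild hjl
        · rw [gd_ne _ hpe]
          by_cases hje : j = pos
          · subst hje
            rw [gd_pos]
            have hplt : (j - 1) / 2 < j := by omega
            have hspos : s < j := by
              have := anc_ge hancp; omega
            exact hE2 _ hcmem hcl hspos
          · rw [gd_ne j hje]
            exact hE1 j hj0 hjl hancp hpe)
      (by
        intro g hg hgl hsc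
        rw [hlen'] at hgl
        rw [hcp, gd_pos, gd_ne g (by omega)]
        have hgc : (g - 1) / 2 = suChild l pos := by omega
        have := hE1 g (by omega) hgl (by rw [hgc]; exact hancc) (by omega)
        rwa [hgc] at this)
    obtain ⟨P', L', U', E'⟩ := H
    rw [suLoop_step hlt]
    refine ⟨P'.trans (set_swap_perm hpos hcl (by omega) x), by rw [L', hlen'], ?_, ?_⟩
    · intro j hj
      have hjpos : j ≠ pos := by intro h; rw [h, hanc] at hj; cases hj
      rw [U' j hj, gd_ne j hjpos]
    · intro j hj0 hjl hancp
      exact E' j hj0 (by rw [hlen']; exact hjl) hancp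
  | case2 l pos hlt =>
    intro hpos hanc hE1 hE2
    have hlen'' : (l.set pos x).length = l.length := by simp
    have H := sd_spec s x (l.set pos x) pos (by rw [hlen'']; exact hpos) hanc
      (by
        intro j hj0 hjl hancp hje
        rw [hlen''] at hjl
        have hpe : (j - 1) / 2 ≠ pos := by omega
        rw [gd_set_ne l (fun h => hpe h.symm) x, gd_set_ne l (fun h => hje h.symm) x]
        exact hE1 j hj0 hjl hancp hpe)
      (by intro c hc hcl; rw [hlen''] at hcl; omega)
      (by intro c hc hcl; rw [hlen''] at hcl; omega)
    obtain ⟨P, L, U, E⟩ := H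
    rw [suLoop_base hlt]
    refine ⟨by rw [List.set_set] at P; exact P, by rw [L, hlen''], ?_, ?_⟩
    · intro j hj
      have hjpos : j ≠ pos := by intro h; rw [h, hanc] at hj; cases hj
      rw [U j hj, gd_set_ne l (fun h => hjpos h.symm) x]
    · intro j hj0 hjl hancp
      exact E j hj0 (by rw [hlen'']; exact hjl) hancp

def IsHeap (l : List Int) : Prop :=
  ∀ j, 0 < j → j < l.length → gd l ((j - 1) / 2) ≤ gd l j

theorem root_min {l : List Int} (h : IsHeap l) : ∀ i, i < l.length → gd l 0 ≤ gd l i := by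
  intro i
  induction i using Nat.strong_induction_on with
  | _ i ih =>
    intro hi
    rcases Nat.eq_zero_or_pos i with h0 | h0
    · subst h0; exact le_refl _
    · exact le_trans (ih ((i - 1) / 2) (by omega) (by omega)) (h i h0 hi)

theorem gd_append {l : List Int} {i : Nat} (h : i < l.length) (t : List Int) :
    gd (l ++ t) i = gd l i := by
  simp [gd, List.getElem?_append_left h]

theorem gd_dropLast {l : List Int} {i : Nat} (h : i < l.length - 1) :
    gd l.dropLast i = gd l i := by
  simp only [gd, List.getD, List.getElem?_dropLast, if_pos h]

theorem set_gd_self {l : List Int} {i : Nat} (h : i < l.length) : l.set i (gd l i) = l := by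
  have : gd l i = l[i] := by simp [gd, List.getD, List.getElem?_eq_getElem h]
  rw [this, List.set_getElem_self]

theorem set_append_last (l : List Int) (v w : Int) :
    (l ++ [v]).set l.length w = l ++ [w] := by
  induction l with
  | nil => rfl
  | cons a as ih => simp [ih]

theorem heappush_spec {l : List Int} (hh : IsHeap l) (v : Int) :
    (pyHeappush l v).Perm (v :: l) ∧ IsHeap (pyHeappush l v)
    ∧ (pyHeappush l v).length = l.length + 1 := by
  have hpos : l.length < (l ++ [v]).length := by simp
  have H := sd_spec 0 v (l ++ [v]) l.length hpos (anc_zero _)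
    (by
      intro j hj0 hjl hancp hje
      simp only [List.length_append, List.length_cons, List.length_nil] at hjl
      have hj : j < l.length := by omega
      rw [gd_append (by omega) [v], gd_append hj [v]]
      exact hh j hj0 hj)
    (by intro c hc hcl; simp at hcl; omega)
    (by intro c hc hcl; simp at hcl; omega)
  obtain ⟨P, L, U, E⟩ := H
  unfold pyHeappush
  rw [set_append_last] at P
  refine ⟨P.trans (List.perm_append_singleton _ _), ?_, by simp [L]⟩
  intro j hj0 hjl
  exact E j hj0 (by rw [L] at hjl; exact hjl) (anc_zero _)

theorem siftup_zero_spec {l : List Int} (hne : l ≠ [])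
    (hE : ∀ j, 0 < j → j < l.length → (j - 1) / 2 ≠ 0 → gd l ((j - 1) / 2) ≤ gd l j) :
    (siftup l 0).Perm l ∧ IsHeap (siftup l 0) ∧ (siftup l 0).length = l.length := by
  have hpos : 0 < l.length := List.length_pos_iff.mpr hne
  have H := su_spec 0 (gd l 0) l 0 hpos (anc_self 0)
    (by intro j hj0 hjl hancp hpe; exact hE j hj0 hjl hpe)
    (by intro c hc hcl hlt; omega)
  obtain ⟨P, L, U, E⟩ := H
  unfold siftup
  rw [set_gd_self hpos] at P
  exact ⟨P, fun j hj0 hjl => E j hj0 (by rw [L] at hjl; exact hjl) (anc_zero _), L⟩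

theorem siftup_mid_spec {l : List Int} {k : Nat} (hk : k < l.length)
    (hE : ∀ j, 0 < j → j < l.length → k + 1 ≤ (j - 1) / 2 → gd l ((j - 1) / 2) ≤ gd l j) :
    (siftup l k).Perm l ∧ (siftup l k).length = l.length
    ∧ (∀ j, 0 < j → j < l.length → k ≤ (j - 1) / 2 →
        gd (siftup l k) ((j - 1) / 2) ≤ gd (siftup l k) j) := by
  have H := su_spec k (gd l k) l k hk (anc_self k)
    (by
      intro j hj0 hjl hancp hpe
      have hge : k ≤ (j - 1) / 2 := anc_ge hancp
      exact hE j hj0 hjl (by omega))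
    (by intro c hc hcl hlt; omega)
  obtain ⟨P, L, U, E⟩ := H
  unfold siftup
  rw [set_gd_self hk] at P
  refine ⟨P, L, ?_⟩
  intro j hj0 hjl hge
  by_cases hanc : anc k ((j - 1) / 2) = true
  · exact E j hj0 hjl hanc
  · have hancj : anc k j = false := by
      have hjk : k < j := by omega
      rw [anc_step hjk]
      exact Bool.not_eq_true _ ▸ (by simpa using hanc)
    rw [U j hancj, U ((j - 1) / 2) (by simpa using hanc)]
    have hne : (j - 1) / 2 ≠ k := by
      intro h; rw [h, anc_self] at hanc; exact hanc rfl
    exact hE j hj0 hjl (by omega)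

theorem heapify_fold (k : Nat) : ∀ (l : List Int), k ≤ l.length / 2 →
    (∀ j, 0 < j → j < l.length → k ≤ (j - 1) / 2 → gd l ((j - 1) / 2) ≤ gd l j) →
    ((List.range k).reverse.foldl (fun l i => siftup l i) l).Perm l
    ∧ ((List.range k).reverse.foldl (fun l i => siftup l i) l).length = l.length
    ∧ IsHeap ((List.range k).reverse.foldl (fun l i => siftup l i) l) := by
  induction k with
  | zero =>
    intro l _ hE
    simp only [List.range_zero, List.reverse_nil, List.foldl_nil]
    exact ⟨List.Perm.refl _, by trivial, fun j hj0 hjl => hE j hj0 hjl (Nat.zero_le _)⟩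
  | succ k ih =>
    intro l hk hE
    rw [List.range_succ, List.reverse_append, List.reverse_cons, List.reverse_nil,
      List.nil_append, List.singleton_append, List.foldl_cons]
    have hkl : k < l.length := by omega
    obtain ⟨P1, L1, E1⟩ := siftup_mid_spec hkl (fun j hj0 hjl hge => hE j hj0 hjl (by omega))
    obtain ⟨P2, L2, H2⟩ := ih (siftup l k) (by omega)
      (fun j hj0 hjl hge => E1 j hj0 (by omega) (by omega))
    exact ⟨P2.trans P1, by omega, H2⟩

theorem heapify_spec (x : List Int) :
    (pyHeapify x).Perm x ∧ (pyHeapify x).length = x.length ∧ IsHeap (pyHeapify x) := by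
  have H := heapify_fold (x.length / 2) x (le_refl _)
    (by intro j hj0 hjl hge; omega)
  exact ⟨H.1, H.2.1, H.2.2⟩

theorem heappop_spec {h : List Int} (hh : IsHeap h) (hne : h ≠ []) :
    (pyHeappop h).1 = gd h 0
    ∧ ((pyHeappop h).1 :: (pyHeappop h).2).Perm h
    ∧ IsHeap (pyHeappop h).2
    ∧ (pyHeappop h).2.length = h.length - 1 := by
  have hlen : 0 < h.length := List.length_pos_iff.mpr hne
  rcases hl : h.getLast? with _ | a
  · exact absurd (List.getLast?_eq_none_iff.mp hl) hne
  have hga : h.getLast hne = a := by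
    rw [List.getLast?_eq_some_getLast hne] at hl
    injection hl
  have hsplit : h.dropLast ++ [a] = h := by
    rw [← hga]; exact List.dropLast_append_getLast hne
  unfold pyHeappop
  rw [hl]
  dsimp only
  by_cases hrest : h.dropLast.isEmpty
  · -- h is a singleton
    rw [if_pos hrest]
    have h1 : h.dropLast = [] := List.isEmpty_iff.mp hrest
    have hsing : h = [a] := by rw [← hsplit, h1]; rfl
    refine ⟨?_, ?_, ?_, ?_⟩
    · rw [hsing]; rfl
    · rw [hsing]
    · intro j hj0 hjl; simp at hjl
    · rw [hsing]; rfl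
  · rw [if_neg hrest]
    dsimp only
    have hrne : h.dropLast ≠ [] := fun he => hrest (by simp [he])
    have hrlen : 0 < h.dropLast.length := List.length_pos_iff.mpr hrne
    have hdlen : h.dropLast.length = h.length - 1 := by simp
    have hl0len : (h.dropLast.set 0 a).length = h.length - 1 := by simp [hdlen]
    have hl0ne : h.dropLast.set 0 a ≠ [] := by
      intro he
      rw [he] at hl0len
      simp at hl0len
      omega
    obtain ⟨P, HH, L⟩ := siftup_zero_spec hl0ne
      (by
        intro j hj0 hjl hpne
        have hjl' : j < h.length - 1 := by
          rw [← hl0len]; exact hjl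
        rw [gd_set_ne _ (by omega) a, gd_set_ne _ (by omega) a,
          gd_dropLast (by omega), gd_dropLast (by omega)]
        exact hh j hj0 (by omega))
    have hgd0 : gd h.dropLast 0 = gd h 0 := gd_dropLast (by omega)
    refine ⟨hgd0, ?_, HH, by rw [L, hl0len]⟩
    have p1 : (gd h.dropLast 0 :: h.dropLast.set 0 a).Perm (a :: h.dropLast) := perm_set hrlen a
    have p2 : (a :: h.dropLast).Perm (h.dropLast ++ [a]) :=
      (List.perm_append_singleton _ _).symm
    exact ((P.cons _).trans (p1.trans (p2.trans (by rw [hsplit]))))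

theorem bIns_perm (l : List Int) (v : Int) : (bIns l v).Perm (v :: l) := by
  induction l with
  | nil => exact List.Perm.refl _
  | cons x xs ih =>
    unfold bIns
    split
    · exact ((ih.cons x).trans (List.Perm.swap _ _ _))
    · exact List.Perm.refl _

theorem bIns_pairwise {l : List Int} (hl : l.Pairwise (· ≤ ·)) (v : Int) :
    (bIns l v).Pairwise (· ≤ ·) := by
  induction l with
  | nil => simp [bIns]
  | cons x xs ih =>
    rw [List.pairwise_cons] at hl
    unfold bIns
    split
    · rename_i hxv
      rw [List.pairwise_cons]
      refine ⟨?_, ih hl.2⟩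
      intro y hy
      rcases List.mem_cons.mp ((bIns_perm xs v).mem_iff.mp hy) with h | h
      · subst h; exact le_of_lt hxv
      · exact hl.1 y h
    · rename_i hxv
      rw [List.pairwise_cons, List.pairwise_cons]
      refine ⟨?_, hl.1, hl.2⟩
      intro y hy
      rcases List.mem_cons.mp hy with h | h
      · subst h; omega
      · exact le_trans (by omega) (hl.1 y h)

theorem root_min_mem {h : List Int} (hh : IsHeap h) : ∀ y ∈ h, gd h 0 ≤ y := by
  intro y hy
  obtain ⟨i, hi, rfl⟩ := List.mem_iff_getElem.mp hy
  have : gd h i = h[i] := by simp [gd, List.getD, List.getElem?_eq_getElem hi]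
  rw [← this]
  exact root_min hh i hi

theorem sortL_perm (xs : List Int) : (sortL xs).Perm xs := PySem.List.sorted_perm xs _ _

theorem sortL_pairwise (xs : List Int) : (sortL xs).Pairwise (· ≤ ·) := by
  have := PySem.List.sorted_pairwise (key := fun x : Int => x) (xs := xs)
  simpa [sortL] using this

theorem sortL_eq {xs ys : List Int} (hp : ys.Perm xs) (hs : ys.Pairwise (· ≤ ·)) :
    sortL xs = ys := by
  unfold sortL
  exact PySem.List.sorted_id_eq_of_perm_of_pairwise xs ys hp hs

theorem sortL_heap_cons {h : List Int} (hh : IsHeap h) (hne : h ≠ []) :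
    sortL h = (pyHeappop h).1 :: sortL (pyHeappop h).2 := by
  obtain ⟨hv, hp, hh2, hl⟩ := heappop_spec hh hne
  apply sortL_eq
  · exact (List.Perm.cons _ (sortL_perm _)).trans hp
  · rw [List.pairwise_cons]
    refine ⟨?_, sortL_pairwise _⟩
    intro y hy
    have hy2 : y ∈ h := hp.mem_iff.mp (List.mem_cons_of_mem _ ((sortL_perm _).mem_iff.mp hy))
    rw [hv]
    exact root_min_mem hh y hy2

theorem loop_corr (fuel : Nat) : ∀ (h : List Int) (K count : Int),
    IsHeap h → h ≠ [] → h.length ≤ fuel →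
    loopA fuel h K count = loopB fuel (sortL h) K count := by
  induction fuel with
  | zero =>
    intro h K count _ hne hlen
    exact absurd (List.length_pos_iff.mpr hne) (by omega)
  | succ fuel ih =>
    intro h K count hh hne hlen
    obtain ⟨hv, hp, hh2, hl2⟩ := heappop_spec hh hne
    have hsort : sortL h = (pyHeappop h).1 :: sortL (pyHeappop h).2 := sortL_heap_cons hh hne
    rw [hsort]
    simp only [loopA, loopB]
    by_cases hK : K ≤ (pyHeappop h).1
    · rw [if_pos hK, if_neg (show ¬ (pyHeappop h).1 < K by omega)]
    · rw [if_neg hK, if_pos (show (pyHeappop h).1 < K by omega)]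
      by_cases hr : (pyHeappop h).2.length = 0
      · rw [if_pos hr]
        have h0 : (pyHeappop h).2 = [] := List.eq_nil_of_length_eq_zero hr
        rw [h0]
        rfl
      · rw [if_neg hr]
        have hrne : (pyHeappop h).2 ≠ [] := by
          intro he; rw [he] at hr; exact hr rfl
        obtain ⟨hv2, hp2, hh3, hl3⟩ := heappop_spec hh2 hrne
        have hsort2 : sortL (pyHeappop h).2
            = (pyHeappop (pyHeappop h).2).1 :: sortL (pyHeappop (pyHeappop h).2).2 :=
          sortL_heap_cons hh2 hrne
        rw [hsort2]
        set m := (pyHeappop h).1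
        set r := (pyHeappop h).2
        set m2 := (pyHeappop r).1
        set r2 := (pyHeappop r).2
        obtain ⟨hpushP, hpushH, hpushL⟩ := heappush_spec hh3 (calculateMixedScoville m m2)
        have hne' : pyHeappush r2 (calculateMixedScoville m m2) ≠ [] := by
          intro he
          rw [he] at hpushL
          simp at hpushL
        have hsort3 : sortL (pyHeappush r2 (calculateMixedScoville m m2))
            = bIns (sortL r2) (2 * m2 + m) := by
          apply sortL_eq
          · exact (bIns_perm _ _).trans
              ((List.Perm.cons _ (sortL_perm r2)).trans hpushP.symm)
          · exact bIns_pairwise (sortL_pairwise r2) _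
        dsimp only
        rw [← hsort3]
        exact ih _ K (count + 1) hpushH hne' (by omega)

theorem solution_eq (scoville : List Int) (K : Int) (hne : scoville ≠ []) :
    solution scoville K = solution_alt scoville K := by
  unfold solution solution_alt
  obtain ⟨hp, hl, hh⟩ := heapify_spec scoville
  have hne2 : pyHeapify scoville ≠ [] := by
    intro he
    rw [he] at hp
    exact hne hp.nil_eq.symm
  have hs : sortL (pyHeapify scoville) = sortL scoville :=
    sortL_eq ((sortL_perm scoville).trans hp.symm) (sortL_pairwise scoville)
  rw [loop_corr scoville.length (pyHeapify scoville) K 0 hh hne2 (by omega), hs]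

-- ===== VERDICT (by name: the statement is the Claim_ definition above) =====
theorem solution_spec : Claim_equal_solution := by
  intro scoville K _ hpre
  unfold Spec_solution
  exact solution_eq scoville K hpre
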